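-- pv_equiv track=rewrite | github.com/sgroy10/jewelclaw | app/services/pricing_engine_service.py | _normalize_quality
-- ===== SOURCE A (Python) =====
-- def _normalize_quality(quality: str) -> str:
--     """Normalize diamond quality to our categories."""
--     q = quality.upper().replace(" ", "").replace("-", "_").replace("/", "_")
--     if any(x in q for x in ("DEF", "D_F", "D_E_F", "EF")):
--         if any(x in q for x in ("VVS", "IF", "FL")):
--             return "DEF_VVS"
--         return "DEF_VVS"
--     if any(x in q for x in ("GH", "G_H")):
--         if any(x in q for x in ("VS", "VVS")):
--             return "GH_VS"
--         return "GH_VS"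
--     if any(x in q for x in ("IJ", "I_J", "KL")):
--         return "IJ_SI"
--     # Fallback by clarity alone
--     if "VVS" in q:
--         return "DEF_VVS"
--     if "VS" in q:
--         return "GH_VS"
--     if "SI" in q:
--         return "IJ_SI"
--     return "GH_VS"  # Default to mid-grade
-- ===== SOURCE B (Python) =====
-- def _normalize_quality(quality: str) -> str:
--     """Normalize diamond quality: one positional scan collecting match flags."""
--     q = quality.upper().replace(" ", "").replace("-", "_").replace("/", "_")
--     f_def = f_gh = f_ij = f_vvs = f_vs = f_si = False
--     for i in range(len(q)):
--         f_def = f_def or q.startswith(("DEF", "D_F", "D_E_F", "EF"), i)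
--         f_gh = f_gh or q.startswith(("GH", "G_H"), i)
--         f_ij = f_ij or q.startswith(("IJ", "I_J", "KL"), i)
--         f_vvs = f_vvs or q.startswith("VVS", i)
--         f_vs = f_vs or q.startswith("VS", i)
--         f_si = f_si or q.startswith("SI", i)
--     if f_def:
--         return "DEF_VVS"
--     if f_gh:
--         return "GH_VS"
--     if f_ij:
--         return "IJ_SI"
--     if f_vvs:
--         return "DEF_VVS"
--     if f_vs:
--         return "GH_VS"
--     if f_si:
--         return "IJ_SI"
--     return "GH_VS"
-- ===== Notes on version B (the rewrite author's own statement) =====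
-- stated objective: alternative
-- what changed: Replaces A's cascade of independent substring searches by a single positional scan of the normalized string that accumulates six boolean match flags (which pattern group starts at each index), followed by a plain flag cascade picking the category.
import Mathlib
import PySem

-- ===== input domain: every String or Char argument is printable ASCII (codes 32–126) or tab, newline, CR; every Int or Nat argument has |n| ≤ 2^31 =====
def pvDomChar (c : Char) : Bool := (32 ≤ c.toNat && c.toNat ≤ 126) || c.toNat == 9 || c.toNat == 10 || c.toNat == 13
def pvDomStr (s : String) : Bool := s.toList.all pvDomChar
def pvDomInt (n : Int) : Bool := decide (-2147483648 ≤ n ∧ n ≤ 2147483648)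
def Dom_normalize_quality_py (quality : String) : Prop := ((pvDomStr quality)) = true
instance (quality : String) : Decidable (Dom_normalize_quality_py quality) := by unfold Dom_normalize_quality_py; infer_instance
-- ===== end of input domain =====

-- B replaces A's cascade of substring searches by one positional scan accumulating match flags; return value only.

-- shared normalization line 'q = quality.upper().replace(...)...' (identical in A and B)
def pvNorm (quality : String) : String :=
  PySem.Str.replace (PySem.Str.replace (PySem.Str.replace (PySem.Str.upper quality) " " "") "-" "_") "/" "_"

-- ===== PORT A =====
def normalize_quality_py (quality : String) : String :=
  let q := pvNorm quality
  if PySem.Str.isIn "DEF" q || PySem.Str.isIn "D_F" q || PySem.Str.isIn "D_E_F" q || PySem.Str.isIn "EF" q then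
    if PySem.Str.isIn "VVS" q || PySem.Str.isIn "IF" q || PySem.Str.isIn "FL" q then "DEF_VVS"
    else "DEF_VVS"
  else if PySem.Str.isIn "GH" q || PySem.Str.isIn "G_H" q then
    if PySem.Str.isIn "VS" q || PySem.Str.isIn "VVS" q then "GH_VS"
    else "GH_VS"
  else if PySem.Str.isIn "IJ" q || PySem.Str.isIn "I_J" q || PySem.Str.isIn "KL" q then "IJ_SI"
  else if PySem.Str.isIn "VVS" q then "DEF_VVS"
  else if PySem.Str.isIn "VS" q then "GH_VS"
  else if PySem.Str.isIn "SI" q then "IJ_SI"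
  else "GH_VS"

-- ===== PORT B =====
-- the loop 'for i in range(len(q)): … q.startswith(p, i) …' : structural recursion over the
-- successive suffixes q[i:]; state = the six flags (f_def, f_gh, f_ij, f_vvs, f_vs, f_si)
def pvScan : List Char → Bool × Bool × Bool × Bool × Bool × Bool → Bool × Bool × Bool × Bool × Bool × Bool
  | [], fs => fs
  | c :: rest, (fd, fg, fi, fvvs, fvs, fsi) =>
      let t := c :: rest
      pvScan rest
        (fd || PySem.Chars.startswith t "DEF".toList || PySem.Chars.startswith t "D_F".toList
            || PySem.Chars.startswith t "D_E_F".toList || PySem.Chars.startswith t "EF".toList,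
         fg || PySem.Chars.startswith t "GH".toList || PySem.Chars.startswith t "G_H".toList,
         fi || PySem.Chars.startswith t "IJ".toList || PySem.Chars.startswith t "I_J".toList
            || PySem.Chars.startswith t "KL".toList,
         fvvs || PySem.Chars.startswith t "VVS".toList,
         fvs || PySem.Chars.startswith t "VS".toList,
         fsi || PySem.Chars.startswith t "SI".toList)

-- the final flag cascade of Source B
def pvPick : Bool × Bool × Bool × Bool × Bool × Bool → String
  | (f_def, f_gh, f_ij, f_vvs, f_vs, f_si) =>
      if f_def then "DEF_VVS"
      else if f_gh then "GH_VS"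
      else if f_ij then "IJ_SI"
      else if f_vvs then "DEF_VVS"
      else if f_vs then "GH_VS"
      else if f_si then "IJ_SI"
      else "GH_VS"

def normalize_quality_py_alt (quality : String) : String :=
  pvPick (pvScan (pvNorm quality).toList (false, false, false, false, false, false))

-- ===== PRECONDITION & SPEC =====
def Spec_normalize_quality_py (quality : String) (out : String) : Prop := out = normalize_quality_py_alt quality
instance (quality : String) (out : String) : Decidable (Spec_normalize_quality_py quality out) := by unfold Spec_normalize_quality_py; infer_instance

-- ===== CLAIM (what is proved, stated in full; the proofs are below) =====
def Claim_equal_normalize_quality_py : Prop := ∀ (quality : String), Dom_normalize_quality_py quality → Spec_normalize_quality_py quality (normalize_quality_py quality)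

-- ===== LEMMAS AND PROOFS =====

-- 'sub occurs in c::rest ↔ it starts there or occurs in rest'
theorem pv_isIn_cons (p : List Char) (c : Char) (rest : List Char) :
    PySem.Chars.isIn p (c :: rest)
      = (PySem.Chars.startswith (c :: rest) p || PySem.Chars.isIn p rest) := by
  rw [Bool.eq_iff_iff]
  simp [PySem.Chars.isIn_iff_infix, PySem.Chars.startswith_iff, List.infix_cons_iff]

theorem pv_isIn_nil (p : List Char) (hp : p ≠ []) : PySem.Chars.isIn p [] = false := by
  rw [← Bool.not_eq_true]
  simp [PySem.Chars.isIn_iff_infix, hp]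

theorem pvScan_eq (l : List Char) (a b c d e f : Bool) :
    pvScan l (a, b, c, d, e, f) =
      (a || PySem.Chars.isIn "DEF".toList l || PySem.Chars.isIn "D_F".toList l
         || PySem.Chars.isIn "D_E_F".toList l || PySem.Chars.isIn "EF".toList l,
       b || PySem.Chars.isIn "GH".toList l || PySem.Chars.isIn "G_H".toList l,
       c || PySem.Chars.isIn "IJ".toList l || PySem.Chars.isIn "I_J".toList l
         || PySem.Chars.isIn "KL".toList l,
       d || PySem.Chars.isIn "VVS".toList l,
       e || PySem.Chars.isIn "VS".toList l,
       f || PySem.Chars.isIn "SI".toList l) := by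
  induction l generalizing a b c d e f with
  | nil => simp [pvScan, pv_isIn_nil]
  | cons x xs ih =>
      simp only [pvScan, ih, pv_isIn_cons]
      simp [Bool.or_assoc, Bool.or_comm, Bool.or_left_comm]

theorem pvScan_eq_false (l : List Char) :
    pvScan l (false, false, false, false, false, false) =
      (PySem.Chars.isIn "DEF".toList l || PySem.Chars.isIn "D_F".toList l
         || PySem.Chars.isIn "D_E_F".toList l || PySem.Chars.isIn "EF".toList l,
       PySem.Chars.isIn "GH".toList l || PySem.Chars.isIn "G_H".toList l,
       PySem.Chars.isIn "IJ".toList l || PySem.Chars.isIn "I_J".toList l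
         || PySem.Chars.isIn "KL".toList l,
       PySem.Chars.isIn "VVS".toList l,
       PySem.Chars.isIn "VS".toList l,
       PySem.Chars.isIn "SI".toList l) := by
  rw [pvScan_eq]
  simp [Bool.false_or]

theorem pvScan_str (q : String) :
    pvScan q.toList (false, false, false, false, false, false) =
      (PySem.Str.isIn "DEF" q || PySem.Str.isIn "D_F" q
         || PySem.Str.isIn "D_E_F" q || PySem.Str.isIn "EF" q,
       PySem.Str.isIn "GH" q || PySem.Str.isIn "G_H" q,
       PySem.Str.isIn "IJ" q || PySem.Str.isIn "I_J" q || PySem.Str.isIn "KL" q,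
       PySem.Str.isIn "VVS" q,
       PySem.Str.isIn "VS" q,
       PySem.Str.isIn "SI" q) := by
  rw [pvScan_eq_false]
  simp only [PySem.Str.isIn_eq]

theorem normalize_quality_py_eq (quality : String) :
    normalize_quality_py quality = normalize_quality_py_alt quality := by
  unfold normalize_quality_py normalize_quality_py_alt
  rw [pvScan_str]
  simp only [pvPick, ite_self]

-- ===== VERDICT (by name: the statement is the Claim_ definition above) =====
theorem normalize_quality_py_spec : Claim_equal_normalize_quality_py := by
  intro quality _
  exact normalize_quality_py_eq quality
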